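-- pv_equiv track=rewrite | github.com/cs-cordero/advent-of-code | advent_of_code/2017/day21/aoc_day_21.py | split_pattern
-- ===== SOURCE A (Python) =====
-- def split_pattern(pattern):
--     """
--     1234
--     5678  = 1234/5678 ==> [[12/56, 34/78]]
--     """
--     rows = pattern.split("/")
--     size = 2 if len(rows) % 2 == 0 else 3
--
--     result = []
--     for height in range(0, len(rows), size):
--         hrows = rows[height : height + size]
--         split_rows = [
--             [row[i : i + size] for i in range(0, len(row), size)] for row in hrows
--         ]
--         zipped_rows = ["/".join(z) for z in zip(*split_rows)]
--         result.append(zipped_rows)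
--     return result
-- ===== SOURCE B (Python) =====
-- def split_pattern(pattern):
--     """
--     1234
--     5678  = 1234/5678 ==> [[12/56, 34/78]]
--     """
--     rows = pattern.split("/")
--     size = 2 if len(rows) % 2 == 0 else 3
--     result = []
--     blocks = None
--     for r, row in enumerate(rows):
--         chunks = [row[i : i + size] for i in range(0, len(row), size)]
--         if r % size == 0:
--             if blocks is not None:
--                 result.append(blocks)
--             blocks = chunks
--         else:
--             blocks = [b + "/" + c for b, c in zip(blocks, chunks)]
--     if blocks is not None:
--         result.append(blocks)
--     return result
-- ===== Notes on version B (the rewrite author's own statement) =====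
-- stated objective: alternative
-- what changed: B is a single streaming pass over the rows with an accumulator: each row's chunks are zip-merged into the current band's growing block strings as the row arrives (flushing a finished band when the row index hits a multiple of size), instead of A's staged per-band pipeline of slicing out a band, splitting every row, transposing with zip(*) and joining.
import Mathlib
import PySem

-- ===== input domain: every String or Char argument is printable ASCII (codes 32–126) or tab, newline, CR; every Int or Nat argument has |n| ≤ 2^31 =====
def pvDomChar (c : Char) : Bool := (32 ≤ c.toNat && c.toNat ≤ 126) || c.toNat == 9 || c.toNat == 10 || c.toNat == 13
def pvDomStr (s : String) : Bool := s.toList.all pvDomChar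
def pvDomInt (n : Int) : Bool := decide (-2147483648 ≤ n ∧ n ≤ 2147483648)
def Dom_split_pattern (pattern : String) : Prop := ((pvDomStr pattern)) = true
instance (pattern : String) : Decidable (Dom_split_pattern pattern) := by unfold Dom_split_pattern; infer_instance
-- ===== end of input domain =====

-- B replaces A's staged per-band pipeline (slice band, split each row, transpose with zip(*), join)
-- by one streaming pass over the rows with an accumulator that zip-merges each row's chunks into the
-- current band's growing block strings, flushing at band boundaries; alternative decomposition, same cost.


-- ===== PORT A =====
-- zip(*lists) for lists of strings: truncate to the shortest list, column i holds the i-th elements.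
def pyZip (ls : List (List String)) : List (List String) :=
  match ls with
  | [] => []
  | l :: rest =>
    let m := rest.foldl (fun acc r => min acc r.length) l.length
    (List.range m).map (fun i => (l :: rest).map (fun r => r.getD i ""))

def split_pattern (pattern : String) : List (List String) :=
  let rows := (PySem.Str.split? pattern "/").getD []
  let size : Int := if PySem.Int.mod (PySem.List.len rows) 2 == 0 then 2 else 3
  (PySem.List.pyRange 0 (PySem.List.len rows) size).foldl (fun result height =>
    let hrows := PySem.List.slice rows (some height) (some (height + size))
    let split_rows := hrows.map (fun row =>
      (PySem.List.pyRange 0 (PySem.Str.len row) size).map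
        (fun i => PySem.Str.slice row (some i) (some (i + size))))
    let zipped_rows := (pyZip split_rows).map (fun z => PySem.Str.join "/" z)
    result ++ [zipped_rows]) []

-- ===== PORT B =====
-- one pass over enumerate(rows); state = (result so far, current band's blocks or none).
-- the '.getD []' in the else-branch is unreachable: row 0 always takes the 'mod = 0' branch and seeds blocks.
def split_pattern_alt (pattern : String) : List (List String) :=
  let rows := (PySem.Str.split? pattern "/").getD []
  let size : Int := if PySem.Int.mod (PySem.List.len rows) 2 == 0 then 2 else 3
  let st := (PySem.List.enumerate rows).foldl
    (fun (st : List (List String) × Option (List String)) rr =>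
      let chunks := (PySem.List.pyRange 0 (PySem.Str.len rr.2) size).map
        (fun i => PySem.Str.slice rr.2 (some i) (some (i + size)))
      if PySem.Int.mod rr.1 size == 0 then
        ((match st.2 with
          | none => st.1
          | some blocks => st.1 ++ [blocks]), some chunks)
      else
        (st.1, some (((st.2.getD []).zip chunks).map (fun bc => bc.1 ++ "/" ++ bc.2))))
    ([], none)
  match st.2 with
  | none => st.1
  | some blocks => st.1 ++ [blocks]

-- ===== PRECONDITION & SPEC =====
def Spec_split_pattern (pattern : String) (out : List (List String)) : Prop := out = split_pattern_alt pattern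
instance (pattern : String) (out : List (List String)) : Decidable (Spec_split_pattern pattern out) := by unfold Spec_split_pattern; infer_instance

-- ===== CLAIM (what is proved, stated in full; the proofs are below) =====
def Claim_equal_split_pattern : Prop := ∀ (pattern : String), Dom_split_pattern pattern → Spec_split_pattern pattern (split_pattern pattern)

-- ===== LEMMAS AND PROOFS =====

-- the chunk list [row[i:i+size] for i in range(0, len(row), size)] both Pythons compute
def pvChunks (size : Int) (row : String) : List String :=
  (PySem.List.pyRange 0 (PySem.Str.len row) size).map
    (fun i => PySem.Str.slice row (some i) (some (i + size)))

-- B's zip-merge of one row into the current band blocks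
def pvZStep (size : Int) (blocks : List String) (row : String) : List String :=
  (blocks.zip (pvChunks size row)).map (fun bc => bc.1 ++ "/" ++ bc.2)

-- B's loop body
def pvBStep (size : Int) (st : List (List String) × Option (List String)) (rr : Int × String) :
    List (List String) × Option (List String) :=
  if PySem.Int.mod rr.1 size == 0 then
    ((match st.2 with
      | none => st.1
      | some blocks => st.1 ++ [blocks]), some (pvChunks size rr.2))
  else
    (st.1, some (pvZStep size (st.2.getD []) rr.2))

-- B's final flush
def pvFin (st : List (List String) × Option (List String)) : List (List String) :=
  match st.2 with
  | none => st.1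
  | some blocks => st.1 ++ [blocks]

-- the common band decomposition: one entry per band of sz consecutive rows
def pvBands (sz : Nat) (g : List String → List String) (rows : List String) : List (List String) :=
  match rows with
  | [] => []
  | row :: rest => g (row :: rest.take (sz - 1)) :: pvBands sz g (rest.drop (sz - 1))
termination_by rows.length
decreasing_by simp [List.length_drop]

-- A's per-band value
def pvGA (size : Int) (band : List String) : List String :=
  (pyZip (band.map (pvChunks size))).map (fun z => PySem.Str.join "/" z)

-- B's per-band value
def pvGB (size : Int) (band : List String) : List String :=
  match band with
  | [] => []
  | row :: brest => brest.foldl (pvZStep size) (pvChunks size row)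

-- range(0, n, s) for 0 < s, 0 < n starts at 0 and continues shifted by s
lemma pyRange_pos_cons (s n : Int) (hs : 0 < s) (hn : 0 < n) :
    PySem.List.pyRange 0 n s = 0 :: (PySem.List.pyRange 0 (n - s) s).map (· + s) := by
  rw [PySem.List.pyRange_of_pos 0 n hs, PySem.List.pyRange_of_pos 0 (n - s) hs]
  have hcnt : (if (0:Int) < n then ((n - 0 + s - 1) / s).toNat else 0)
      = (if (0:Int) < n - s then ((n - s - 0 + s - 1) / s).toNat else 0) + 1 := by
    rw [if_pos hn]
    have e1 : n - 0 + s - 1 = (n - 1) + 1 * s := by ring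
    rw [e1, Int.add_mul_ediv_right _ _ (show s ≠ 0 by omega)]
    by_cases h : (0:Int) < n - s
    · rw [if_pos h]
      have e2 : n - s - 0 + s - 1 = (n - 1 - s) + 1 * s := by ring
      rw [e2, Int.add_mul_ediv_right _ _ (show s ≠ 0 by omega)]
      have key : (n - 1) / s = (n - 1 - s) / s + 1 := by
        have hq := Int.add_mul_ediv_right (n - 1 - s) 1 (show s ≠ 0 by omega)
        have e3 : n - 1 - s + 1 * s = n - 1 := by ring
        rw [e3] at hq; omega
      have hnn : 0 ≤ (n - 1 - s) / s := Int.ediv_nonneg (by omega) (by omega)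
      omega
    · rw [if_neg h]
      have h1 : (n - 1) / s = 0 := Int.ediv_eq_zero_of_lt (by omega) (by omega)
      rw [h1]; rfl
  rw [hcnt, List.range_succ_eq_map, List.map_cons, List.map_map, List.map_map]
  refine congrArg₂ _ (by ring_nf) (List.map_congr_left ?_)
  intro k _
  simp only [Function.comp]
  push_cast
  ring

-- range(0, n, s) is empty when n ≤ 0
lemma pyRange_pos_nil (s n : Int) (hs : 0 < s) (hn : n ≤ 0) :
    PySem.List.pyRange 0 n s = [] := by
  rw [PySem.List.pyRange_of_pos 0 n hs, if_neg (by omega)]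
  rfl

-- [f(band) for each band, by slicing] equals the recursive band decomposition
lemma A_map_bands (size : Int) (hs : 0 < size) (g : List String → List String) (rows : List String) :
    (PySem.List.pyRange 0 (PySem.List.len rows) size).map
      (fun h => g (PySem.List.slice rows (some h) (some (h + size))))
      = pvBands size.toNat g rows := by
  induction rows using pvBands.induct size.toNat with
  | case1 => simp [PySem.List.len_eq, pyRange_pos_nil size 0 hs le_rfl, pvBands]
  | case2 row rest ih =>
    have hn : (0:Int) < PySem.List.len (row :: rest) := by
      rw [PySem.List.len_eq]; simp
    rw [pyRange_pos_cons size _ hs hn, List.map_cons, List.map_map]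
    have hhead : PySem.List.slice (row :: rest) (some 0) (some (0 + size))
        = row :: rest.take (size.toNat - 1) := by
      rw [PySem.List.slice_toNat _ le_rfl (by omega)]
      have e : ((0:Int) + size).toNat - (0:Int).toNat = (size.toNat - 1) + 1 := by omega
      rw [e]
      simp only [Int.toNat_zero, List.drop_zero, List.take_succ_cons]
    have hshift : ∀ h' ∈ PySem.List.pyRange 0 (PySem.List.len (row :: rest) - size) size,
        g (PySem.List.slice (row :: rest) (some (h' + size)) (some (h' + size + size)))
          = g (PySem.List.slice (rest.drop (size.toNat - 1)) (some h') (some (h' + size))) := by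
      intro h' hmem
      obtain ⟨h0, -, -⟩ := (PySem.List.mem_pyRange_iff_of_pos hs h').mp hmem
      congr 1
      rw [PySem.List.slice_toNat _ (by omega) (by omega),
          PySem.List.slice_toNat _ (by omega) (by omega)]
      rw [List.drop_drop]
      have e1 : (h' + size + size).toNat - (h' + size).toNat = size.toNat := by omega
      have e2 : (h' + size).toNat - h'.toNat = size.toNat := by omega
      rw [e1, e2]
      congr 1
      have e3 : (h' + size).toNat = (size.toNat - 1 + h'.toNat) + 1 := by omega
      rw [e3, List.drop_succ_cons]
    have hlen : PySem.List.pyRange 0 (PySem.List.len (row :: rest) - size) size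
        = PySem.List.pyRange 0 (PySem.List.len (rest.drop (size.toNat - 1))) size := by
      rw [PySem.List.len_eq, PySem.List.len_eq, List.length_drop, List.length_cons]
      by_cases hc : size.toNat - 1 ≤ rest.length
      · congr 1; omega
      · rw [pyRange_pos_nil size _ hs (by omega), pyRange_pos_nil size _ hs (by omega)]
    have htail : ((PySem.List.pyRange 0 (PySem.List.len (row :: rest) - size) size).map
        ((fun h => g (PySem.List.slice (row :: rest) (some h) (some (h + size)))) ∘ (· + size)))
        = pvBands size.toNat g (rest.drop (size.toNat - 1)) := by
      rw [← ih, ← hlen]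
      apply List.map_congr_left
      intro h' hm
      simpa using hshift h' hm
    rw [hhead, htail]
    conv_rhs => rw [pvBands]

-- sep.join([x]) = x
lemma pvJoinSingle (x : String) : PySem.Str.join "/" [x] = x := by
  have h : (PySem.Str.join "/" [x]).toList = x.toList := by
    rw [PySem.Str.toList_join]; simp [PySem.Chars.join_singleton]
  exact String.toList_inj.mp h

-- merging a pre-joined pair back into the join
lemma pvJoinStep (a b : String) (xs : List String) :
    PySem.Str.join "/" ((a ++ "/" ++ b) :: xs) = PySem.Str.join "/" (a :: b :: xs) := by
  have h : (PySem.Str.join "/" ((a ++ "/" ++ b) :: xs)).toList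
      = (PySem.Str.join "/" (a :: b :: xs)).toList := by
    rw [PySem.Str.toList_join, PySem.Str.toList_join]
    cases xs <;>
      simp [PySem.Chars.join_singleton, PySem.Chars.join_cons_cons]
  exact String.toList_inj.mp h

-- reading back a list by indexing over its range
lemma pvMapGetD (l : List String) : (List.range l.length).map (fun i => l.getD i "") = l := by
  apply List.ext_getElem (by simp)
  intro i h1 h2
  simp only [List.getElem_map, List.getElem_range]
  rw [List.getD_eq_getElem l "" h2]

-- a foldl of min is at most its seed
lemma pvFoldlMinLe (l : List (List String)) (a : Nat) :
    l.foldl (fun acc r => min acc r.length) a ≤ a := by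
  induction l generalizing a with
  | nil => simp
  | cons x xs ih => exact le_trans (ih (min a x.length)) (min_le_left a x.length)

-- zip-folding chunk lists into the first one computes zip(*)-transpose-then-join
lemma zipfold (ls : List (List String)) (l0 : List String) :
    ls.foldl (fun bl ch => (bl.zip ch).map (fun bc : String × String => bc.1 ++ "/" ++ bc.2)) l0
      = (pyZip (l0 :: ls)).map (fun z => PySem.Str.join "/" z) := by
  induction ls generalizing l0 with
  | nil =>
    show l0 = _
    unfold pyZip
    simp only [List.foldl_nil, List.map_map]
    rw [show ((fun z => PySem.Str.join "/" z) ∘ fun i => [l0].map (fun r => r.getD i ""))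
        = fun i => PySem.Str.join "/" [l0.getD i ""] from rfl]
    conv_lhs => rw [← pvMapGetD l0]
    exact List.map_congr_left (fun i _ => (pvJoinSingle _).symm)
  | cons l1 ls ih =>
    rw [List.foldl_cons, ih]
    unfold pyZip
    simp only [List.map_map]
    have hm : ls.foldl (fun acc r => min acc r.length)
          ((l0.zip l1).map (fun bc : String × String => bc.1 ++ "/" ++ bc.2)).length
        = (l1 :: ls).foldl (fun acc r => min acc r.length) l0.length := by
      rw [List.foldl_cons, List.length_map, List.length_zip]
    rw [hm]
    apply List.map_congr_left
    intro i hi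
    have hiM : i < (l1 :: ls).foldl (fun acc r => min acc r.length) l0.length :=
      List.mem_range.mp hi
    have hle : (l1 :: ls).foldl (fun acc r => min acc r.length) l0.length
        ≤ min l0.length l1.length := by
      rw [List.foldl_cons]; exact pvFoldlMinLe ls _
    have hizip : i < (l0.zip l1).length := by rw [List.length_zip]; omega
    have hget : ((l0.zip l1).map
          (fun bc : String × String => bc.1 ++ "/" ++ bc.2)).getD i ""
        = l0.getD i "" ++ "/" ++ l1.getD i "" := by
      rw [List.getD_eq_getElem _ "" (by simpa using hizip), List.getElem_map, List.getElem_zip,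
        List.getD_eq_getElem l0 "" (by omega), List.getD_eq_getElem l1 "" (by omega)]
    simp only [Function.comp, List.map_cons]
    rw [hget, pvJoinStep]

-- the per-band values agree
lemma band_eq (size : Int) (band : List String) : pvGA size band = pvGB size band := by
  cases band with
  | nil => rfl
  | cons row brest =>
    show (pyZip ((row :: brest).map (pvChunks size))).map (fun z => PySem.Str.join "/" z)
        = brest.foldl (pvZStep size) (pvChunks size row)
    rw [List.map_cons, ← zipfold (brest.map (pvChunks size)) (pvChunks size row),
      List.foldl_map]
    rfl

-- B's inner steps: rows at indices not divisible by size only zip-merge into the band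
lemma B_inner (size : Int) (brows : List String) :
    ∀ (j : Int), (∀ k : Nat, k < brows.length → ¬ (size ∣ (j + k))) →
    ∀ (acc : List (List String)) (blocks : List String),
      (PySem.List.enumerate brows j).foldl (pvBStep size) (acc, some blocks)
        = (acc, some (brows.foldl (pvZStep size) blocks)) := by
  induction brows with
  | nil => intro j _ acc blocks; rfl
  | cons b bs ih =>
    intro j h acc blocks
    rw [PySem.List.enumerate_cons, List.foldl_cons]
    have hne : ¬ (PySem.Int.mod j size = 0) := by
      intro hmod
      exact h 0 (by simp) (by simpa using (PySem.Int.mod_eq_zero_iff_dvd j size).mp hmod)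
    have hstep : pvBStep size (acc, some blocks) (j, b)
        = (acc, some (pvZStep size blocks b)) := by
      unfold pvBStep
      rw [if_neg (by simpa using hne)]
      rfl
    have hshift : ∀ k : Nat, k < bs.length → ¬ (size ∣ (j + 1 + (k : Int))) := by
      intro k hk hdvd
      apply h (k + 1) (by simpa using Nat.succ_lt_succ hk)
      have he : (j + ((k + 1 : Nat) : Int)) = j + 1 + (k : Int) := by push_cast; ring
      rw [he]; exact hdvd
    rw [hstep, ih (j + 1) hshift acc, List.foldl_cons]

-- B's streaming loop, run from any state at a band boundary, appends the band decomposition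
lemma B_run (size : Int) (hs : 0 < size) :
    ∀ (rows : List String), ∀ (j : Int), size ∣ j → ∀ (acc : List (List String))
      (obl : Option (List String)),
      pvFin ((PySem.List.enumerate rows j).foldl (pvBStep size) (acc, obl))
        = pvFin (acc, obl) ++ pvBands size.toNat (pvGB size) rows := by
  intro rows
  induction rows using pvBands.induct size.toNat with
  | case1 => intro j hj acc obl; simp [PySem.List.enumerate, pvBands, pvFin]
  | case2 row rest ih =>
    intro j hj acc obl
    rw [PySem.List.enumerate_cons, List.foldl_cons]
    have hmod : PySem.Int.mod j size = 0 := (PySem.Int.mod_eq_zero_iff_dvd j size).mpr hj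
    have hstep : pvBStep size (acc, obl) (j, row)
        = (pvFin (acc, obl), some (pvChunks size row)) := by
      unfold pvBStep pvFin
      rw [if_pos (by simpa using hmod)]
    rw [hstep]
    conv_lhs => rw [← List.take_append_drop (size.toNat - 1) rest]
    rw [PySem.List.enumerate_append, List.foldl_append]
    have hk : ∀ k : Nat, k < (rest.take (size.toNat - 1)).length → ¬ (size ∣ (j + 1 + k)) := by
      intro k hk hdvd
      have hlt : k < size.toNat - 1 := lt_of_lt_of_le hk (by simp [List.length_take])
      have h1 : size ∣ ((1 + k : Nat) : Int) := by
        have := (dvd_sub hdvd hj)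
        convert this using 1; push_cast; ring
      have h2 : ((1 + k : Nat) : Int) ≤ size - 1 := by omega
      have h3 := Int.le_of_dvd (by positivity) h1
      omega
    rw [B_inner size _ (j + 1) hk]
    by_cases hD : rest.drop (size.toNat - 1) = []
    · rw [hD]
      conv_rhs => rw [pvBands, hD, pvBands]
      simp [PySem.List.enumerate, pvFin, pvGB]
    · have hlen : (rest.take (size.toNat - 1)).length = size.toNat - 1 := by
        rw [List.length_take]
        have := List.drop_eq_nil_iff.not.mp hD
        omega
      have hj' : size ∣ (j + 1 + ((rest.take (size.toNat - 1)).length : Int)) := by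
        rw [hlen]
        have : (j + 1 + ((size.toNat - 1 : Nat) : Int)) = j + size := by
          omega
        rw [this]
        exact dvd_add hj dvd_rfl
      rw [ih _ hj' _ _]
      conv_rhs => rw [pvBands]
      simp only [pvFin, pvGB]
      rw [List.append_assoc, List.singleton_append]

-- the band functions can be exchanged pointwise under pvBands
lemma pvBands_congr (sz : Nat) (g1 g2 : List String → List String)
    (h : ∀ b, g1 b = g2 b) (rows : List String) :
    pvBands sz g1 rows = pvBands sz g2 rows := by
  induction rows using pvBands.induct sz with
  | case1 => rw [pvBands, pvBands]
  | case2 row rest ih => rw [pvBands, pvBands, h, ih]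

-- both programs, after the shared split and size computation, produce the band decomposition
lemma pvMain (rows : List String) (size : Int) (hs : 0 < size) :
    (PySem.List.pyRange 0 (PySem.List.len rows) size).foldl (fun result height =>
        result ++ [pvGA size (PySem.List.slice rows (some height) (some (height + size)))]) []
      = pvFin ((PySem.List.enumerate rows 0).foldl (pvBStep size) ([], none)) := by
  rw [PySem.List.foldl_append_singleton_eq_map
      (fun height => pvGA size (PySem.List.slice rows (some height) (some (height + size)))),
    List.nil_append, A_map_bands size hs, B_run size hs rows 0 (dvd_zero size) [] none]
  show _ = [] ++ _
  rw [List.nil_append]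
  exact pvBands_congr _ _ _ (band_eq size) rows

-- ===== VERDICT (by name: the statement is the Claim_ definition above) =====
theorem split_pattern_spec : Claim_equal_split_pattern := by
  intro pattern _
  show split_pattern pattern = split_pattern_alt pattern
  exact pvMain ((PySem.Str.split? pattern "/").getD [])
    (if PySem.Int.mod (PySem.List.len ((PySem.Str.split? pattern "/").getD [])) 2 == 0 then 2 else 3)
    (by split <;> norm_num)
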